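-- pv_equiv track=rewrite | github.com/a4science/ASE22 | fuzzers/Finch/fuzzer.py | logspace
-- ===== SOURCE A (Python) =====
-- def logspace(mi, ma):
--     ranges = []
--     idx = 0
--     diff = ma - mi
--     while True:
--         fr = 0 if not idx else 2 ** idx
--         to = 2 ** (idx + 1)
--         if to > diff: to = diff
--         if fr >= diff: break
--         ranges.append((mi + fr, mi + to))
--         idx += 1
--     return ranges
-- ===== SOURCE B (Python) =====
-- def logspace(mi, ma):
--     diff = ma - mi
--     if diff <= 0:
--         return []
--     return _ranges(mi, diff)
--
--
-- def _ranges(mi, hi):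
--     # ranges covering offsets (0, hi], split top-down at the largest power of two below hi
--     if hi <= 2:
--         return [(mi, mi + hi)]
--     p = 1 << ((hi - 1).bit_length() - 1)  # largest power of two strictly below hi
--     return _ranges(mi, p) + [(mi + p, mi + hi)]
-- ===== Notes on version B (the rewrite author's own statement) =====
-- stated objective: alternative
-- what changed: B replaces A's bottom-up doubling loop with a recursive top-down decomposition: it splits the span at the largest power of two below it (computed with bit_length) and recurses on the lower part, emitting ranges back-to-front.
import Mathlib
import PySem

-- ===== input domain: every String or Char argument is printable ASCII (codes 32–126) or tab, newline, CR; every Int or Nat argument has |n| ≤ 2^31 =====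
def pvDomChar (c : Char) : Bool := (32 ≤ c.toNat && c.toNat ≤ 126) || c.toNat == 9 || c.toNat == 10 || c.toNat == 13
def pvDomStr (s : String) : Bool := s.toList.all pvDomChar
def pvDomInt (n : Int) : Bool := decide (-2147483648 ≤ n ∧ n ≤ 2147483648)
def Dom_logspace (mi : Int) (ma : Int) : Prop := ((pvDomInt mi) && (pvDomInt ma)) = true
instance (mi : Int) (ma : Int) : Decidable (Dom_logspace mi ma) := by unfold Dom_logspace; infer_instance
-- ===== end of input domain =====

-- B rebuilds the ranges recursively top-down, splitting at the largest power of two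
-- below the span (via bit_length), instead of A's bottom-up doubling loop; same cost,
-- and A = B is proved on all inputs.

-- ===== PORT A =====
-- the `while True` loop of A: fr/to computed from idx, clamp, break test, append, idx += 1
def logA_loop (mi : Int) (diff : Int) (idx : Nat) : List (Int × Int) :=
  if (if idx = 0 then (0 : Int) else 2 ^ idx) ≥ diff then []
  else (mi + (if idx = 0 then (0 : Int) else 2 ^ idx),
        mi + (if 2 ^ (idx + 1) > diff then diff else 2 ^ (idx + 1)))
       :: logA_loop mi diff (idx + 1)
termination_by (diff + 1 - (if idx = 0 then (0 : Int) else 2 ^ idx)).toNat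
decreasing_by
  have h1 : (0 : Int) < 2 ^ idx := by positivity
  have h2 : (2 : Int) ^ (idx + 1) = 2 * 2 ^ idx := by ring
  simp only [if_false] at *
  split at * <;> omega

def logspace (mi : Int) (ma : Int) : List (Int × Int) :=
  logA_loop mi (ma - mi) 0

-- ===== PORT B =====
-- `1 << ((hi - 1).bit_length() - 1)` of Source B: for 2 < hi this is the largest power of
-- two strictly below hi; its exponent is Nat.log2 (hi - 1).toNat (bit_length n = log2 n + 1
-- for n > 0, exact on the positive spans _ranges is called with). This bound justifies
-- the recursion's termination, so the port states it as a named lemma.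
theorem pow_log2_lt_self (hi : Int) (h : 2 < hi) :
    (2 : Int) ^ Nat.log2 (hi - 1).toNat < hi := by
  have h1 : 2 ^ Nat.log2 (hi - 1).toNat ≤ (hi - 1).toNat := Nat.log2_self_le (by omega)
  have h2 : (((2 : Nat) ^ Nat.log2 (hi - 1).toNat : Nat) : Int) ≤ (((hi - 1).toNat : Nat) : Int) :=
    Int.ofNat_le.mpr h1
  push_cast at h2
  omega

-- _ranges of Source B: recursive top-down split at the largest power of two below hi
def logB_ranges (mi : Int) (hi : Int) : List (Int × Int) :=
  if _hle : hi ≤ 2 then [(mi, mi + hi)]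
  else
    logB_ranges mi ((2 : Int) ^ Nat.log2 (hi - 1).toNat) ++
      [(mi + (2 : Int) ^ Nat.log2 (hi - 1).toNat, mi + hi)]
termination_by hi.toNat
decreasing_by
  have := pow_log2_lt_self hi (by omega)
  have h0 : (0 : Int) < (2 : Int) ^ Nat.log2 (hi - 1).toNat := by positivity
  omega

def logspace_alt (mi : Int) (ma : Int) : List (Int × Int) :=
  if ma - mi ≤ 0 then [] else logB_ranges mi (ma - mi)

-- ===== PRECONDITION & SPEC =====
def Spec_logspace (mi : Int) (ma : Int) (out : List (Int × Int)) : Prop := out = logspace_alt mi ma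
instance (mi : Int) (ma : Int) (out : List (Int × Int)) : Decidable (Spec_logspace mi ma out) := by unfold Spec_logspace; infer_instance

-- ===== CLAIM (what is proved, stated in full; the proofs are below) =====
def Claim_equal_logspace : Prop := ∀ (mi : Int) (ma : Int), Dom_logspace mi ma → Spec_logspace mi ma (logspace mi ma)

-- ===== LEMMAS AND PROOFS =====

-- one-step unfoldings of A's loop, used to rewrite a chosen call site
theorem A_stop (mi diff : Int) (idx : Nat)
    (h : (if idx = 0 then (0 : Int) else 2 ^ idx) ≥ diff) :
    logA_loop mi diff idx = [] := by rw [logA_loop, if_pos h]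

theorem A_go (mi diff : Int) (idx : Nat)
    (h : ¬ (if idx = 0 then (0 : Int) else 2 ^ idx) ≥ diff) :
    logA_loop mi diff idx =
      (mi + (if idx = 0 then (0 : Int) else 2 ^ idx),
       mi + (if 2 ^ (idx + 1) > diff then diff else 2 ^ (idx + 1)))
      :: logA_loop mi diff (idx + 1) := by rw [logA_loop, if_neg h]

-- A's loop, started at any idx ≤ m, splits off the topmost range when 2^m < diff ≤ 2^(m+1)
theorem A_split (mi diff : Int) (m : Nat) (hm : 1 ≤ m)
    (hlo : (2 : Int) ^ m < diff) (hhi : diff ≤ 2 ^ (m + 1)) :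
    ∀ j idx, idx + j = m →
      logA_loop mi diff idx = logA_loop mi ((2 : Int) ^ m) idx ++ [(mi + 2 ^ m, mi + diff)] := by
  intro j
  induction j with
  | zero =>
    intro idx hidx
    obtain rfl : idx = m := by omega
    have hfr : (if idx = 0 then (0 : Int) else 2 ^ idx) = 2 ^ idx := if_neg (by omega)
    rw [A_go mi diff idx (by rw [hfr]; omega)]
    rw [A_stop mi diff (idx + 1) (by rw [if_neg (by omega)]; exact hhi)]
    rw [A_stop mi ((2 : Int) ^ idx) idx (by rw [hfr])]
    have hto : (if 2 ^ (idx + 1) > diff then diff else (2 : Int) ^ (idx + 1)) = diff := by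
      split <;> omega
    rw [hfr, hto]
    simp
  | succ k ih =>
    intro idx hidx
    have hm0 : (0 : Int) < 2 ^ m := by positivity
    have hpw : (2 : Int) ^ idx < 2 ^ m := pow_lt_pow_right₀ one_lt_two (by omega)
    have hto : (2 : Int) ^ (idx + 1) ≤ 2 ^ m := pow_le_pow_right₀ one_le_two (by omega)
    rw [A_go mi diff idx (by split <;> omega)]
    rw [A_go mi ((2 : Int) ^ m) idx (by split <;> omega)]
    have h1 : (if 2 ^ (idx + 1) > diff then diff else (2 : Int) ^ (idx + 1)) = 2 ^ (idx + 1) :=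
      if_neg (by omega)
    have h2 : (if 2 ^ (idx + 1) > (2 : Int) ^ m then (2 : Int) ^ m else (2 : Int) ^ (idx + 1))
        = 2 ^ (idx + 1) := if_neg (by omega)
    rw [h1, h2, ih (idx + 1) (by omega)]
    simp

theorem main_eq (mi : Int) : ∀ (n : Nat) (diff : Int), 0 < diff → diff.toNat ≤ n →
    logA_loop mi diff 0 = logB_ranges mi diff := by
  intro n
  induction n with
  | zero => intro diff h hn; omega
  | succ k ih =>
    intro diff h hn
    rw [logB_ranges]
    by_cases hle : diff ≤ 2
    · rw [dif_pos hle]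
      rw [A_go mi diff 0 (by norm_num; omega)]
      rw [A_stop mi diff 1 (by norm_num; omega)]
      have hto : (if 2 ^ (0 + 1) > diff then diff else (2 : Int) ^ (0 + 1)) = diff := by
        norm_num
        omega
      rw [hto]
      norm_num
    · rw [dif_neg hle]
      have hm1 : 1 ≤ Nat.log2 (diff - 1).toNat :=
        (Nat.le_log2 (n := (diff - 1).toNat) (by omega)).mpr (by omega)
      have hlo : (2 : Int) ^ Nat.log2 (diff - 1).toNat < diff := pow_log2_lt_self diff (by omega)
      have hhi : diff ≤ 2 ^ (Nat.log2 (diff - 1).toNat + 1) := by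
        have h1 : (diff - 1).toNat < 2 ^ (Nat.log2 (diff - 1).toNat + 1) := Nat.lt_log2_self
        have h2 : (((diff - 1).toNat : Nat) : Int) < (((2 : Nat) ^ (Nat.log2 (diff - 1).toNat + 1) : Nat) : Int) :=
          Int.ofNat_lt.mpr h1
        push_cast at h2
        omega
      have hpos : (0 : Int) < (2 : Int) ^ Nat.log2 (diff - 1).toNat := by positivity
      rw [← ih ((2 : Int) ^ Nat.log2 (diff - 1).toNat) hpos (by omega)]
      exact A_split mi diff (Nat.log2 (diff - 1).toNat) hm1 hlo hhi
        (Nat.log2 (diff - 1).toNat) 0 (by omega)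

-- ===== VERDICT (by name: the statement is the Claim_ definition above) =====
theorem logspace_spec : Claim_equal_logspace := by
  intro mi ma _
  unfold Spec_logspace logspace logspace_alt
  by_cases h : ma - mi ≤ 0
  · rw [if_pos h, A_stop mi (ma - mi) 0 (by norm_num; omega)]
  · rw [if_neg h]
    exact main_eq mi (ma - mi).toNat (ma - mi) (by omega) (by omega)
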